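-- pv_equiv track=rewrite | github.com/centralelyon/pipeoptz | pipeoptz/utils.py | ith_subset
-- ===== SOURCE A (Python) =====
-- from math import comb
--
-- def ith_subset(n: int, i: int) -> list[int]:
--     """
--     Returns the i-th subset of A = [0, n-1], ordered first by cardinality,
--     then lexicographically within each cardinality class.
--
--     Args:
--         n (int): Upper bound of the interval A = [0, n-1].
--         i (int): Index (0 <= i < 2^n) in the cardinality-sorted power set.
--
--     Returns:
--         list[int]: The i-th subset under the cardinality-lex order.
--     """
--     total = 2**n
--     if i < 0 or i >= total:
--         raise ValueError(f"Index i must be in [0, {total - 1}]")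
--
--     # Find the cardinality group (number of elements in subset)
--     remaining = i
--     for k in range(n + 1):  # cardinalities from 0 to n
--         c = comb(n, k)
--         if remaining < c:
--             cardinality = k
--             break
--         remaining -= c
--
--     # Generate the `remaining`-th k-combination in lex order
--     subset = []
--     x = 0
--     for j in range(cardinality):
--         while comb(n-1 - x, cardinality - j - 1) <= remaining:
--             remaining -= comb(n-1 - x, cardinality - j - 1)
--             x += 1
--         subset.append(x)
--         x += 1
--     return subset
-- ===== SOURCE B (Python) =====
-- from math import comb
--
-- def ith_subset(n: int, i: int) -> list[int]:
--     total = 2 ** n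
--     if i < 0 or i >= total:
--         raise ValueError(f"Index i must be in [0, {total - 1}]")
--     # cardinality k and rank r within the k-subsets, via a cumulative counter
--     k, acc = 0, 0
--     while acc + comb(n, k) <= i:
--         acc += comb(n, k)
--         k += 1
--     r = i - acc
--     # Lex rank r among k-subsets of [0,n-1] corresponds, under the bijection
--     # S -> {n-1-x : x not-in-position ...}: reflected complement-free view -- the
--     # combination with lex rank r equals, reflected (x -> n-1-x), the combination
--     # with COLEX rank comb(n,k)-1-r.  Unrank that colex rank with the combinadic:
--     # pick each digit c_j (j = k..1) as the largest c with comb(c, j) <= rr,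
--     # found by binary search, then map back via x = n-1-c (already increasing).
--     rr = comb(n, k) - 1 - r
--     out = []
--     hi = n
--     for j in range(k, 0, -1):
--         lo, up = j - 1, hi - 1
--         while lo < up:
--             mid = (lo + up + 1) // 2
--             if comb(mid, j) <= rr:
--                 lo = mid
--             else:
--                 up = mid - 1
--         out.append(n - 1 - lo)
--         rr -= comb(lo, j)
--         hi = lo
--     return out
-- ===== Notes on version B (the rewrite author's own statement) =====
-- stated objective: alternative
-- what changed: A unranks the k-combination low-element-first with a linear scan (inner while advancing a cursor x over candidate elements); B instead converts the lex rank to the colex rank of the reflected combination (rr = comb(n,k)-1-r) and extracts each combinadic digit as the largest c with comb(c,j) <= rr via binary search, mapping back through x = n-1-c; the cardinality loop accumulates a cumulative counter instead of destructively decrementing the rank.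
import Mathlib
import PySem

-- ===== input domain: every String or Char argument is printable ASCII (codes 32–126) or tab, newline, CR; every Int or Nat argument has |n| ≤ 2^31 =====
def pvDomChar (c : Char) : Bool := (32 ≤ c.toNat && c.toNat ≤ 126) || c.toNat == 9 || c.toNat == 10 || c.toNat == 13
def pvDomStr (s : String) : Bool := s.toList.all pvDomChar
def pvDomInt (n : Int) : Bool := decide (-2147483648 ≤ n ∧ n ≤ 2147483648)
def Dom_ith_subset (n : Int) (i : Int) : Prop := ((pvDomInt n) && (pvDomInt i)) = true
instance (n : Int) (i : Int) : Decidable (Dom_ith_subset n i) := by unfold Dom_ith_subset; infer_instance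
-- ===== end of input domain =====

-- B unranks the combination by a different algorithm: it converts the lex rank to the colex
-- rank of the reflected combination and extracts each combinadic digit with a binary search,
-- instead of A's smallest-element linear scan (alternative algorithm, no speed claim).

-- math.comb(a, b) for the nonnegative arguments reached under Pre_ (Python raises on negatives)
def pycomb (a b : Int) : Int := (a.toNat.choose b.toNat : Int)

-- ===== PORT A =====
-- "for k in range(n+1): … if remaining < c: break …"; none = loop ends without break
-- (then Python hits NameError, outside Pre_)
def pvFindCard (n k r : Int) : Option (Int × Int) :=
  if _h : k ≤ n then
    if r < pycomb n k then some (k, r)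
    else pvFindCard n (k + 1) (r - pycomb n k)
  else none
termination_by (n + 1 - k).toNat
decreasing_by omega

-- the inner "while comb(n-1-x, cardinality-j-1) <= remaining" loop (m = cardinality-j-1);
-- fuel is a totality guard only: under Pre_ the loop always exits within n+1 steps
def pvAdvance (n m : Int) : Nat → Int → Int → Int × Int
  | 0, x, r => (x, r)
  | fuel + 1, x, r =>
    if pycomb (n - 1 - x) m ≤ r then pvAdvance n m fuel (x + 1) (r - pycomb (n - 1 - x) m)
    else (x, r)

-- the outer "for j in range(cardinality)" loop with state (subset, x, remaining)
def pvOuterA (n card j : Int) (subset : List Int) (x r : Int) : List Int :=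
  if h : j < card then
    let p := pvAdvance n (card - j - 1) (n + 1).toNat x r
    pvOuterA n card (j + 1) (subset ++ [p.1]) (p.1 + 1) p.2
  else subset
termination_by (card - j).toNat
decreasing_by omega

def ith_subset (n : Int) (i : Int) : List Int :=
  -- Python raises ValueError when i < 0 or i >= 2**n (outside Pre_)
  if i < 0 ∨ Int.ofNat (2 ^ n.toNat) ≤ i then []
  else
    match pvFindCard n 0 i with
    | some p => pvOuterA n p.1 0 [] 0 p.2
    | none => []  -- Python NameError here (unreachable under Pre_)

-- ===== PORT B =====
-- Source B's "while acc + comb(n, k) <= i" cumulative cardinality loop; fuel is a totality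
-- guard only (n+1 steps suffice under Pre_)
def pvSearchB (n i : Int) : Nat → Int → Int → Int × Int
  | 0, k, acc => (k, acc)
  | fuel + 1, k, acc =>
    if acc + pycomb n k ≤ i then pvSearchB n i fuel (k + 1) (acc + pycomb n k)
    else (k, acc)

-- Source B's inner "while lo < up" binary search for the largest c with comb(c, j) <= rr
def pvBisect (j rr lo up : Int) : Int :=
  if _h : lo < up then
    let mid := PySem.Int.floordiv (lo + up + 1) 2
    if pycomb mid j ≤ rr then pvBisect j rr mid up
    else pvBisect j rr lo (mid - 1)
  else lo
termination_by (up - lo).toNat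
decreasing_by
  · have := PySem.Int.floordiv_two_mid_bounds (lo := lo + 1) (hi := up) (by omega)
    have e : lo + 1 + up = lo + up + 1 := by ring
    rw [e] at this
    omega
  · have := PySem.Int.floordiv_two_mid_bounds (lo := lo + 1) (hi := up) (by omega)
    have e : lo + 1 + up = lo + up + 1 := by ring
    rw [e] at this
    omega

-- Source B's "for j in range(k, 0, -1)" combinadic-digit loop with state (out, rr, hi)
def pvOuterB (n j rr hi : Int) (out : List Int) : List Int :=
  if _h : 1 ≤ j then
    let c := pvBisect j rr (j - 1) (hi - 1)
    pvOuterB n (j - 1) (rr - pycomb c j) c (out ++ [n - 1 - c])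
  else out
termination_by j.toNat
decreasing_by omega

def ith_subset_alt (n : Int) (i : Int) : List Int :=
  if i < 0 ∨ Int.ofNat (2 ^ n.toNat) ≤ i then []  -- Python raises ValueError here (outside Pre_)
  else
    let p := pvSearchB n i (n + 1).toNat 0 0
    let r := i - p.2
    let rr := pycomb n p.1 - 1 - r
    pvOuterB n p.1 rr n []

-- ===== PRECONDITION & SPEC =====
-- Pre_: exactly the inputs where A returns normally: n ≥ 0 and 0 ≤ i < 2^n
-- (i out of range → ValueError; n < 0 → ValueError or NameError).
def Pre_ith_subset (n : Int) (i : Int) : Prop := 0 ≤ n ∧ 0 ≤ i ∧ i < Int.ofNat (2 ^ n.toNat)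
instance (n : Int) (i : Int) : Decidable (Pre_ith_subset n i) := by
  unfold Pre_ith_subset; infer_instance
def pvWitness_ith_subset : Int × Int := (3, 5)

def Spec_ith_subset (n : Int) (i : Int) (out : List Int) : Prop := out = ith_subset_alt n i
instance (n : Int) (i : Int) (out : List Int) : Decidable (Spec_ith_subset n i out) := by
  unfold Spec_ith_subset; infer_instance

-- ===== CLAIM (what is proved, stated in full; the proofs are below) =====
def Claim_equal_ith_subset : Prop := ∀ (n : Int) (i : Int), Dom_ith_subset n i → Pre_ith_subset n i → Spec_ith_subset n i (ith_subset n i)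

-- ===== LEMMAS AND PROOFS =====

-- proof-side cons-recursion characterisation of the lex unranking both programs compute
def pvUnrank (n k r base : Int) : List Int :=
  if k ≤ 0 then []
  else if _h : n ≤ 0 then []
  else
    let c := pycomb (n - 1) (k - 1)
    if r < c then base :: pvUnrank (n - 1) (k - 1) r (base + 1)
    else pvUnrank (n - 1) k (r - c) (base + 1)
termination_by n.toNat
decreasing_by all_goals omega

lemma pycomb_pos_le {a b : Int} (h : 1 ≤ pycomb a b) : b.toNat ≤ a.toNat := by
  unfold pycomb at h
  by_contra hc
  push_neg at hc
  rw [Nat.choose_eq_zero_of_lt hc] at h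
  norm_num at h

lemma pycomb_pascal {a b : Int} (ha : 1 ≤ a) (hb : 1 ≤ b) :
    pycomb a b = pycomb (a - 1) (b - 1) + pycomb (a - 1) b := by
  unfold pycomb
  have h1 : a.toNat = (a - 1).toNat + 1 := by omega
  have h2 : b.toNat = (b - 1).toNat + 1 := by omega
  rw [h1, h2, Nat.choose_succ_succ]
  push_cast; ring

lemma pycomb_mono {a b : Int} (j : Int) (h : a ≤ b) : pycomb a j ≤ pycomb b j := by
  unfold pycomb
  exact_mod_cast Nat.choose_le_choose j.toNat (by omega : a.toNat ≤ b.toNat)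

lemma unrank_include {n k r base : Int} (hk : 1 ≤ k) (hn : 1 ≤ n)
    (hc : r < pycomb (n - 1) (k - 1)) :
    pvUnrank n k r base = base :: pvUnrank (n - 1) (k - 1) r (base + 1) := by
  rw [pvUnrank]
  rw [if_neg (by omega : ¬ k ≤ 0), dif_neg (by omega : ¬ n ≤ 0), if_pos hc]

lemma unrank_exclude {n k r base : Int} (hk : 1 ≤ k) (hn : 1 ≤ n)
    (hc : pycomb (n - 1) (k - 1) ≤ r) :
    pvUnrank n k r base = pvUnrank (n - 1) k (r - pycomb (n - 1) (k - 1)) (base + 1) := by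
  rw [pvUnrank]
  rw [if_neg (by omega : ¬ k ≤ 0), dif_neg (by omega : ¬ n ≤ 0), if_neg (not_lt.mpr hc)]

-- ===== A-side lemmas (A's nested loops compute pvUnrank) =====

lemma advance_spec (n : Int) : ∀ (fuel : Nat) (m x r : Int), 0 ≤ m → 0 ≤ r →
    r < pycomb (n - x) (m + 1) → (n - x).toNat ≤ fuel →
    x ≤ (pvAdvance n m fuel x r).1 ∧ 0 ≤ (pvAdvance n m fuel x r).2 ∧
    (pvAdvance n m fuel x r).2 < pycomb (n - (pvAdvance n m fuel x r).1 - 1) m ∧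
    (pvAdvance n m fuel x r).1 ::
        pvUnrank (n - (pvAdvance n m fuel x r).1 - 1) m (pvAdvance n m fuel x r).2
          ((pvAdvance n m fuel x r).1 + 1)
      = pvUnrank (n - x) (m + 1) r x := by
  intro fuel
  induction fuel with
  | zero =>
    intro m x r hm hr hinv hfuel
    exfalso
    have h1 : 1 ≤ pycomb (n - x) (m + 1) := by omega
    have := pycomb_pos_le h1
    omega
  | succ fuel ih =>
    intro m x r hm hr hinv hfuel
    have h1 : 1 ≤ pycomb (n - x) (m + 1) := by omega
    have hle := pycomb_pos_le h1
    have hnx : 1 ≤ n - x := by omega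
    have hpas : pycomb (n - x) (m + 1) = pycomb (n - x - 1) m + pycomb (n - x - 1) (m + 1) := by
      have := pycomb_pascal (a := n - x) (b := m + 1) hnx (by omega)
      simpa using this
    have harg : n - 1 - x = n - x - 1 := by ring
    by_cases hc : pycomb (n - 1 - x) m ≤ r
    · have hstep : pvAdvance n m (fuel + 1) x r
          = pvAdvance n m fuel (x + 1) (r - pycomb (n - 1 - x) m) := by
        simp [pvAdvance, hc]
      have hinv' : r - pycomb (n - 1 - x) m < pycomb (n - (x + 1)) (m + 1) := by
        rw [harg]
        have : n - (x + 1) = n - x - 1 := by ring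
        rw [this]; omega
      have hfuel' : (n - (x + 1)).toNat ≤ fuel := by omega
      have hr' : 0 ≤ r - pycomb (n - 1 - x) m := by omega
      obtain ⟨ha, hb, hc2, hd⟩ := ih m (x + 1) (r - pycomb (n - 1 - x) m) hm hr' hinv' hfuel'
      rw [hstep]
      refine ⟨by omega, hb, hc2, ?_⟩
      rw [hd]
      have hx : pvUnrank (n - x) (m + 1) r x
          = pvUnrank (n - x - 1) (m + 1) (r - pycomb (n - x - 1) (m + 1 - 1)) (x + 1) :=
        unrank_exclude (by omega) hnx (by
          have e1 : m + 1 - 1 = m := by ring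
          rw [e1, ← harg]; exact hc)
      have e1 : m + 1 - 1 = m := by ring
      rw [e1, ← harg] at hx
      have e2 : n - (x + 1) = n - x - 1 := by ring
      rw [hx, harg, e2]
    · have hstep : pvAdvance n m (fuel + 1) x r = (x, r) := by
        simp [pvAdvance, hc]
      rw [hstep]
      push_neg at hc
      rw [harg] at hc
      refine ⟨le_refl x, hr, hc, ?_⟩
      have hx : pvUnrank (n - x) (m + 1) r x
          = x :: pvUnrank (n - x - 1) (m + 1 - 1) r (x + 1) :=
        unrank_include (by omega) hnx (by
          have e1 : m + 1 - 1 = m := by ring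
          rw [e1]; exact hc)
      have e1 : m + 1 - 1 = m := by ring
      rw [e1] at hx
      rw [hx]

lemma outer_spec (n card : Int) : ∀ (t : Nat) (j x r : Int) (subset : List Int),
    card - j = (t : Int) → 0 ≤ x → 0 ≤ r → r < pycomb (n - x) (card - j) →
    pvOuterA n card j subset x r = subset ++ pvUnrank (n - x) (card - j) r x := by
  intro t
  induction t with
  | zero =>
    intro j x r subset ht hx hr hinv
    have hj : ¬ j < card := by omega
    rw [pvOuterA, dif_neg hj, pvUnrank, if_pos (by omega : card - j ≤ 0)]
    simp
  | succ t ih =>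
    intro j x r subset ht hx hr hinv
    have hj : j < card := by omega
    have hinv' : r < pycomb (n - x) ((card - j - 1) + 1) := by
      have : card - j - 1 + 1 = card - j := by ring
      rw [this]; exact hinv
    obtain ⟨ha, hb, hc2, hd⟩ := advance_spec n ((n + 1).toNat) (card - j - 1) x r
      (by omega) hr hinv' (by omega)
    rw [pvOuterA, dif_pos hj]
    set p := pvAdvance n (card - j - 1) (n + 1).toNat x r with hp
    have ih' := ih (j + 1) (p.1 + 1) p.2 (subset ++ [p.1])
      (by omega) (by omega) hb
      (by have e : card - (j + 1) = card - j - 1 := by ring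
          have e2 : n - (p.1 + 1) = n - p.1 - 1 := by ring
          rw [e, e2]; exact hc2)
    simp only at ih'
    rw [ih']
    have e : card - (j + 1) = card - j - 1 := by ring
    have e2 : n - (p.1 + 1) = n - p.1 - 1 := by ring
    rw [e, e2]
    have hd' : p.1 :: pvUnrank (n - p.1 - 1) (card - j - 1) p.2 (p.1 + 1)
        = pvUnrank (n - x) (card - j) r x := by
      have e3 : card - j - 1 + 1 = card - j := by ring
      rw [e3] at hd; exact hd
    rw [List.append_assoc]
    simp only [List.singleton_append]
    rw [hd']

lemma findCard_spec (n : Int) (hn : 0 ≤ n) : ∀ (d : Nat) (k r : Int), 0 ≤ k → 0 ≤ r →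
    n + 1 - k = (d : Int) →
    r < (∑ j ∈ Finset.Ico k.toNat (n.toNat + 1), (n.toNat.choose j : Int)) →
    ∃ k' r', pvFindCard n k r = some (k', r') ∧ 0 ≤ k' ∧ k' ≤ n ∧ 0 ≤ r' ∧ r' < pycomb n k' := by
  intro d
  induction d with
  | zero =>
    intro k r hk hr hd hsum
    exfalso
    have : k.toNat = n.toNat + 1 := by omega
    rw [this] at hsum
    simp at hsum
    omega
  | succ d ih =>
    intro k r hk hr hd hsum
    have hkn : k ≤ n := by omega
    rw [pvFindCard, dif_pos hkn]
    by_cases hc : r < pycomb n k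
    · exact ⟨k, r, by rw [if_pos hc], hk, hkn, hr, hc⟩
    · rw [if_neg hc]
      push_neg at hc
      have hlt : k.toNat < n.toNat + 1 := by omega
      rw [Finset.sum_eq_sum_Ico_succ_bot hlt] at hsum
      have hknat : (k + 1).toNat = k.toNat + 1 := by omega
      have hsum' : r - pycomb n k <
          (∑ j ∈ Finset.Ico (k + 1).toNat (n.toNat + 1), (n.toNat.choose j : Int)) := by
        rw [hknat]
        have : pycomb n k = (n.toNat.choose k.toNat : Int) := rfl
        omega
      exact ih (k + 1) (r - pycomb n k) (by omega) (by omega) (by omega) hsum'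

-- B's cumulative cardinality search agrees with A's subtracting one: acc tracks i - r
lemma search_eq (n i : Int) : ∀ (fuel : Nat) (k acc k' r' : Int),
    pvFindCard n k (i - acc) = some (k', r') → (n + 1 - k).toNat ≤ fuel →
    pvSearchB n i fuel k acc = (k', i - r') := by
  intro fuel
  induction fuel with
  | zero =>
    intro k acc k' r' hfc hfuel
    exfalso
    have hkn : ¬ k ≤ n := by omega
    rw [pvFindCard, dif_neg hkn] at hfc
    simp at hfc
  | succ fuel ih =>
    intro k acc k' r' hfc hfuel
    by_cases hkn : k ≤ n
    · rw [pvFindCard, dif_pos hkn] at hfc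
      by_cases hc : i - acc < pycomb n k
      · rw [if_pos hc] at hfc
        injection hfc with h
        injection h with h1 h2
        subst h1
        simp only [pvSearchB]
        rw [if_neg (by omega)]
        refine Prod.ext rfl ?_
        omega
      · rw [if_neg hc] at hfc
        push_neg at hc
        simp only [pvSearchB, if_pos (by omega : acc + pycomb n k ≤ i)]
        have e : i - (acc + pycomb n k) = i - acc - pycomb n k := by ring
        exact ih (k + 1) (acc + pycomb n k) k' r' (by rw [e]; exact hfc) (by omega)
    · rw [pvFindCard, dif_neg hkn] at hfc
      simp at hfc

-- the binary search returns a c in [lo, up] with pycomb c j ≤ rr < pycomb (c+1) j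
lemma bisect_spec (j rr : Int) : ∀ (t : Nat) (lo up : Int), (up - lo).toNat ≤ t →
    lo ≤ up → pycomb lo j ≤ rr → rr < pycomb (up + 1) j →
    lo ≤ pvBisect j rr lo up ∧ pvBisect j rr lo up ≤ up ∧
    pycomb (pvBisect j rr lo up) j ≤ rr ∧ rr < pycomb (pvBisect j rr lo up + 1) j := by
  intro t
  induction t with
  | zero =>
    intro lo up ht hle hlo hup
    have heq : lo = up := by omega
    rw [pvBisect, dif_neg (by omega : ¬ lo < up)]
    subst heq
    exact ⟨le_refl _, le_refl _, hlo, hup⟩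
  | succ t ih =>
    intro lo up ht hle hlo hup
    by_cases hlt : lo < up
    · rw [pvBisect, dif_pos hlt]
      have hmid := PySem.Int.floordiv_two_mid_bounds (lo := lo + 1) (hi := up) (by omega)
      have e : lo + 1 + up = lo + up + 1 := by ring
      rw [e] at hmid
      set mid := PySem.Int.floordiv (lo + up + 1) 2 with hm
      by_cases hc : pycomb mid j ≤ rr
      · rw [if_pos hc]
        obtain ⟨h1, h2, h3, h4⟩ := ih mid up (by omega) (by omega) hc hup
        exact ⟨by omega, h2, h3, h4⟩
      · rw [if_neg hc]
        push_neg at hc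
        have hup' : rr < pycomb (mid - 1 + 1) j := by
          have : mid - 1 + 1 = mid := by ring
          rw [this]; exact hc
        obtain ⟨h1, h2, h3, h4⟩ := ih lo (mid - 1) (by omega) (by omega) hlo hup'
        exact ⟨h1, by omega, h3, h4⟩
    · rw [pvBisect, dif_neg hlt]
      have heq : lo = up := by omega
      subst heq
      exact ⟨le_refl _, le_refl _, hlo, hup⟩

-- one combinadic digit = the run of exclude-steps then one include-step of pvUnrank
lemma unrank_digit : ∀ (t : Nat) (hi j rr c base : Int), hi.toNat ≤ t →
    1 ≤ j → j ≤ hi → 0 ≤ rr →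
    j - 1 ≤ c → c ≤ hi - 1 → pycomb c j ≤ rr → rr < pycomb (c + 1) j →
    pvUnrank hi j (pycomb hi j - 1 - rr) base
      = (base + hi - 1 - c) ::
        pvUnrank c (j - 1) (pycomb c (j - 1) - 1 - (rr - pycomb c j)) (base + hi - c) := by
  intro t
  induction t with
  | zero =>
    intro hi j rr c base ht h1 h2 h3 h4 h5 h6 h7
    omega
  | succ t ih =>
    intro hi j rr c base ht h1 h2 h3 h4 h5 h6 h7
    have hhi : 1 ≤ hi := by omega
    have hpas : pycomb hi j = pycomb (hi - 1) (j - 1) + pycomb (hi - 1) j :=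
      pycomb_pascal hhi h1
    by_cases hcase : c = hi - 1
    · -- include step: the digit is hi-1
      subst hcase
      have hcc : pycomb hi j - 1 - rr < pycomb (hi - 1) (j - 1) := by omega
      rw [unrank_include h1 hhi hcc]
      have e1 : base + hi - 1 - (hi - 1) = base := by ring
      have e2 : base + hi - (hi - 1) = base + 1 := by ring
      rw [e1, e2]
      congr 1
      congr 1
      omega
    · -- exclude step: c ≤ hi - 2, the digit is further down
      have hc2 : c ≤ hi - 2 := by omega
      have hrlt : rr < pycomb (hi - 1) j := by
        have := pycomb_mono j (by omega : c + 1 ≤ hi - 1)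
        omega
      have hcc : pycomb (hi - 1) (j - 1) ≤ pycomb hi j - 1 - rr := by omega
      rw [unrank_exclude h1 hhi hcc]
      have e : pycomb hi j - 1 - rr - pycomb (hi - 1) (j - 1)
          = pycomb (hi - 1) j - 1 - rr := by omega
      rw [e]
      have := ih (hi - 1) j rr c (base + 1) (by omega) h1 (by omega) h3 h4 (by omega) h6 h7
      rw [this]
      have e1 : base + 1 + (hi - 1) - 1 - c = base + hi - 1 - c - 1 + 1 := by ring
      have e2 : base + 1 + (hi - 1) - c = base + hi - c := by ring
      rw [e1, e2]
      congr 1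
      omega

-- B's digit loop computes pvUnrank (colex rank rr = pycomb hi j - 1 - lex rank)
lemma outerB_spec (n : Int) : ∀ (t : Nat) (j rr hi : Int) (out : List Int),
    j = (t : Int) → 0 ≤ j → j ≤ hi → 0 ≤ rr → rr < pycomb hi j →
    pvOuterB n j rr hi out = out ++ pvUnrank hi j (pycomb hi j - 1 - rr) (n - hi) := by
  intro t
  induction t with
  | zero =>
    intro j rr hi out ht h0 h1 h2 h3
    rw [pvOuterB, dif_neg (by omega : ¬ 1 ≤ j), pvUnrank, if_pos (by omega : j ≤ 0)]
    simp
  | succ t ih =>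
    intro j rr hi out ht h0 h1 h2 h3
    have hj : 1 ≤ j := by omega
    rw [pvOuterB, dif_pos hj]
    have hlo : pycomb (j - 1) j ≤ rr := by
      have : pycomb (j - 1) j = 0 := by
        unfold pycomb
        rw [Nat.choose_eq_zero_of_lt (by omega)]
        rfl
      omega
    have hup : rr < pycomb (hi - 1 + 1) j := by
      have e : hi - 1 + 1 = hi := by ring
      rw [e]; exact h3
    obtain ⟨b1, b2, b3, b4⟩ := bisect_spec j rr ((hi - 1 - (j - 1)).toNat)
      (j - 1) (hi - 1) (le_refl _) (by omega) hlo hup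
    set c := pvBisect j rr (j - 1) (hi - 1) with hc
    have hdig := unrank_digit hi.toNat hi j rr c (n - hi) (le_refl _)
      hj h1 h2 b1 b2 b3 b4
    have hrr' : 0 ≤ rr - pycomb c j := by omega
    have hrr'lt : rr - pycomb c j < pycomb c (j - 1) := by
      have : pycomb (c + 1) j = pycomb c (j - 1) + pycomb c j := by
        have := pycomb_pascal (a := c + 1) (b := j) (by omega) hj
        simpa using this
      omega
    have ihj := ih (j - 1) (rr - pycomb c j) c (out ++ [n - 1 - c])
      (by omega) (by omega) (by omega) hrr' hrr'lt
    rw [ihj, hdig]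
    have e1 : n - hi + hi - 1 - c = n - 1 - c := by ring
    have e2 : n - hi + hi - c = n - c := by ring
    rw [e1, e2, List.append_assoc]
    simp

lemma sum_choose_int (m : Nat) :
    (∑ j ∈ Finset.Ico 0 (m + 1), (m.choose j : Int)) = (2 : Int) ^ m := by
  rw [← Nat.cast_sum]
  have : ∑ j ∈ Finset.Ico 0 (m + 1), m.choose j = ∑ j ∈ Finset.range (m + 1), m.choose j := by
    rw [Finset.range_eq_Ico]
  rw [this, Nat.sum_range_choose]
  push_cast; ring

-- ===== VERDICT (by name: the statement is the Claim_ definition above) =====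
theorem ith_subset_spec : Claim_equal_ith_subset := by
  intro n i _ hpre
  obtain ⟨hn, hi0, hi2⟩ := hpre
  unfold Spec_ith_subset ith_subset ith_subset_alt
  have hguard : ¬ (i < 0 ∨ Int.ofNat (2 ^ n.toNat) ≤ i) := by push_neg; omega
  rw [if_neg hguard, if_neg hguard]
  have hsum : i < (∑ j ∈ Finset.Ico (0 : Int).toNat (n.toNat + 1), (n.toNat.choose j : Int)) := by
    have hcast : Int.ofNat (2 ^ n.toNat) = (2 : Int) ^ n.toNat := by rw [Int.ofNat_eq_natCast]; push_cast; ring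
    have : (0 : Int).toNat = 0 := rfl
    rw [this, sum_choose_int]; omega
  obtain ⟨k, r, hfc, hk, hkn, hr, hkr⟩ :=
    findCard_spec n hn (n + 1).toNat 0 i (le_refl 0) hi0 (by omega) hsum
  rw [hfc]
  have hfc' : pvFindCard n 0 (i - 0) = some (k, r) := by
    have e : i - 0 = i := by ring
    rw [e]; exact hfc
  have hb := search_eq n i (n + 1).toNat 0 0 k r hfc' (by omega)
  rw [hb]
  simp only
  -- A side
  have houter := outer_spec n k k.toNat 0 0 r []
    (by omega) (le_refl 0) hr
    (by have : n - 0 = n := by ring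
        have e : k - 0 = k := by ring
        rw [this, e]; exact hkr)
  simp only [List.nil_append] at houter
  have e1 : k - 0 = k := by ring
  have e2 : n - 0 = n := by ring
  rw [e1, e2] at houter
  -- B side
  have hB := outerB_spec n k.toNat k (pycomb n k - 1 - (i - (i - r))) n []
    (by omega) hk hkn (by omega) (by omega)
  simp only [List.nil_append] at hB
  rw [hB]
  have e3 : pycomb n k - 1 - (pycomb n k - 1 - (i - (i - r))) = r := by ring
  have e4 : n - n = 0 := by ring
  rw [e3, e4]
  exact houter
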